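-- pv_equiv track=rewrite | github.com/anikom15/scanline-classic | scripts/generate_deck_presets.py | append_fhd_suffix_to_image
-- ===== SOURCE A (Python) =====
-- def append_fhd_suffix_to_image(path_value: str):
--     """Append -fhd before .png/.jpg extension if not already present."""
--     lower = path_value.lower()
--     for ext in ('.png', '.jpg'):
--         if lower.endswith(ext):
--             base = path_value[:-len(ext)]
--             if base.lower().endswith('-fhd'):
--                 return path_value, False
--             return f"{base}-fhd{path_value[-len(ext):]}", True
--     return path_value, False
-- ===== SOURCE B (Python) =====
-- import re
--
-- _FHD_PATTERN = re.compile(r'(.*)(\.png|\.jpg)', re.IGNORECASE | re.DOTALL)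
--
--
-- def append_fhd_suffix_to_image(path_value: str):
--     """Append -fhd before .png/.jpg extension if not already present."""
--     m = _FHD_PATTERN.fullmatch(path_value)
--     if m is None:
--         return path_value, False
--     base, ext = m.group(1), m.group(2)
--     if base.lower().endswith('-fhd'):
--         return path_value, False
--     return f"{base}-fhd{ext}", True
-- ===== Notes on version B (the rewrite author's own statement) =====
-- stated objective: idiomatic
-- what changed: Replaces A's loop of endswith tests over the two extensions and its slice arithmetic with a single precompiled case-insensitive regex fullmatch whose two capture groups yield base and original-case extension directly.
import Mathlib
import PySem

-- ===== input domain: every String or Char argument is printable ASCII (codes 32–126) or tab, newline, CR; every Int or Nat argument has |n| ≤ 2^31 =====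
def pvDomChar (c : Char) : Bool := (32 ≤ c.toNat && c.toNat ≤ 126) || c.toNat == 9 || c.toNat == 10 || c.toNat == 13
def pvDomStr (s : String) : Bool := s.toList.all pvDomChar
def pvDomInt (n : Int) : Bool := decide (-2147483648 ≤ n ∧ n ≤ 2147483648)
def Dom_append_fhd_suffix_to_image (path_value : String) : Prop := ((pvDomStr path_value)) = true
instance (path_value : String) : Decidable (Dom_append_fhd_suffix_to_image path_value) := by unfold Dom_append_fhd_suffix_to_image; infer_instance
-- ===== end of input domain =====

-- B replaces A's loop of endswith tests over the two extensions with a single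
-- case-insensitive regex fullmatch whose capture groups yield base and extension
-- (objective: idiomatic).


-- ===== PORT A =====
-- the 'for ext in ('.png', '.jpg')' loop, with its early returns, as structural recursion
def fhdLoopA (path_value lower : String) : List String → String × Bool
  | [] => (path_value, false)
  | ext :: rest =>
    if PySem.Str.endswith lower ext then
      let base := PySem.Str.slice path_value none (some (-(PySem.Str.len ext)))
      if PySem.Str.endswith (PySem.Str.lower base) "-fhd" then (path_value, false)
      else (String.ofList (base.toList ++ "-fhd".toList
              ++ (PySem.Str.slice path_value (some (-(PySem.Str.len ext))) none).toList), true)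
    else fhdLoopA path_value lower rest

def append_fhd_suffix_to_image (path_value : String) : String × Bool :=
  fhdLoopA path_value (PySem.Str.lower path_value) [".png", ".jpg"]

-- ===== PORT B =====
-- Hand-port of Source B's `_FHD_PATTERN.fullmatch(path_value)` with pattern
-- r'(.*)(\.png|\.jpg)' and flags IGNORECASE|DOTALL (PySem has no regex):
-- the alternation branches have length exactly 4, so with DOTALL the greedy
-- `(.*)` leaves precisely the 4-char tail to the second group; the fullmatch
-- succeeds iff that lowered tail is ".png" or ".jpg", giving
-- group(1) = path_value[:-4] and group(2) = path_value[-4:] in original case.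
-- This is exact for every string input.
def fhdFullmatch? (s : String) : Option (String × String) :=
  let ext := PySem.Str.slice s (some (-4)) none
  if PySem.Str.lower ext = ".png" ∨ PySem.Str.lower ext = ".jpg" then
    some (PySem.Str.slice s none (some (-4)), ext)
  else none

def append_fhd_suffix_to_image_alt (path_value : String) : String × Bool :=
  match fhdFullmatch? path_value with
  | none => (path_value, false)
  | some (base, ext) =>
    if PySem.Str.endswith (PySem.Str.lower base) "-fhd" then (path_value, false)
    else (String.ofList (base.toList ++ "-fhd".toList ++ ext.toList), true)

-- ===== PRECONDITION & SPEC =====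
def Spec_append_fhd_suffix_to_image (path_value : String) (out : String × Bool) : Prop := out = append_fhd_suffix_to_image_alt path_value
instance (path_value : String) (out : String × Bool) : Decidable (Spec_append_fhd_suffix_to_image path_value out) := by unfold Spec_append_fhd_suffix_to_image; infer_instance

-- ===== CLAIM (what is proved, stated in full; the proofs are below) =====
def Claim_equal_append_fhd_suffix_to_image : Prop := ∀ (path_value : String), Dom_append_fhd_suffix_to_image path_value → Spec_append_fhd_suffix_to_image path_value (append_fhd_suffix_to_image path_value)

-- ===== LEMMAS AND PROOFS =====

-- `lower(s)` ends with a 4-char lowercase extension e iff the lowered last-4 slice equals e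
theorem lower_endswith4_iff (cs e : List Char) (he : e.length = 4) :
    PySem.Chars.endswith (PySem.Chars.lower cs) e = true ↔
      PySem.Chars.lower (cs.drop (cs.length - 4)) = e := by
  rw [PySem.Chars.endswith_iff]
  constructor
  · intro h
    have h2 := List.suffix_iff_eq_drop.mp h
    simp only [PySem.Chars.lower, List.length_map, he] at h2
    rw [PySem.Chars.lower, List.map_drop]
    exact (h2.trans (by rfl)).symm
  · intro h
    have : e <:+ PySem.Chars.lower cs := by
      rw [← h, PySem.Chars.lower, List.map_drop]
      exact List.drop_suffix _ _
    exact this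

theorem ofList_eq_iff (l : List Char) (t : String) : String.ofList l = t ↔ l = t.toList := by
  constructor
  · intro h; rw [← h, String.toList_ofList]
  · intro h; rw [h, String.ofList_toList]

theorem toList_slice_from (s : String) :
    (PySem.Str.slice s (some (-4)) none).toList = s.toList.drop (s.toList.length - 4) := by
  rw [PySem.Str.toList_slice, PySem.Chars.slice_eq_listSlice, PySem.List.slice_from_neg_ofNat _ 4 (by omega)]

theorem lower_slice_eq_iff (s t : String) :
    PySem.Str.lower (PySem.Str.slice s (some (-4)) none) = t ↔
      PySem.Chars.lower (s.toList.drop (s.toList.length - 4)) = t.toList := by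
  rw [PySem.Str.lower, ofList_eq_iff, toList_slice_from]

theorem endswith_lower_iff (s t : String) (he : t.toList.length = 4) :
    PySem.Str.endswith (PySem.Str.lower s) t = true ↔
      PySem.Chars.lower (s.toList.drop (s.toList.length - 4)) = t.toList := by
  rw [PySem.Str.endswith_eq, PySem.Str.toList_lower, lower_endswith4_iff _ _ he]

theorem main_eq (s : String) : append_fhd_suffix_to_image s = append_fhd_suffix_to_image_alt s := by
  have h4 : PySem.Str.len ".png" = 4 := by decide
  have h4' : PySem.Str.len ".jpg" = 4 := by decide
  have hPiff := lower_slice_eq_iff s ".png"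
  have hJiff := lower_slice_eq_iff s ".jpg"
  have hAp := endswith_lower_iff s ".png" (by decide)
  have hAj := endswith_lower_iff s ".jpg" (by decide)
  unfold append_fhd_suffix_to_image append_fhd_suffix_to_image_alt fhdFullmatch?
  simp only [fhdLoopA, h4, h4']
  by_cases hp : PySem.Chars.lower (s.toList.drop (s.toList.length - 4)) = ".png".toList
  · rw [if_pos (hAp.mpr hp), if_pos (Or.inl (hPiff.mpr hp))]
  · by_cases hj : PySem.Chars.lower (s.toList.drop (s.toList.length - 4)) = ".jpg".toList
    · rw [if_neg (show ¬(PySem.Str.endswith (PySem.Str.lower s) ".png" = true) from fun h => hp (hAp.mp h)),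
          if_pos (hAj.mpr hj), if_pos (Or.inr (hJiff.mpr hj))]
    · rw [if_neg (show ¬(PySem.Str.endswith (PySem.Str.lower s) ".png" = true) from fun h => hp (hAp.mp h)),
          if_neg (show ¬(PySem.Str.endswith (PySem.Str.lower s) ".jpg" = true) from fun h => hj (hAj.mp h)),
          if_neg (show ¬(PySem.Str.lower (PySem.Str.slice s (some (-4)) none) = ".png" ∨
                         PySem.Str.lower (PySem.Str.slice s (some (-4)) none) = ".jpg")
                  from fun h => h.elim (fun h1 => hp (hPiff.mp h1)) (fun h2 => hj (hJiff.mp h2)))]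

-- ===== VERDICT (by name: the statement is the Claim_ definition above) =====
theorem append_fhd_suffix_to_image_spec : Claim_equal_append_fhd_suffix_to_image := by
  intro s _
  exact main_eq s
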